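-- pv_equiv track=rewrite | github.com/TechHead25/Pharma_TechTitans | pharmaguard-backend/app/parsers/vcf_parser.py | validate_vcf_structure
-- ===== SOURCE A (Python) =====
-- from typing import Dict, List, Optional, Tuple
--
-- def validate_vcf_structure(content: str) -> Tuple[bool, str]:
--     """Validate basic VCF structure"""
--     if not content:
--         return False, "Empty file"
--
--     lines = content.strip().split('\n')
--     if not any(line.startswith('##fileformat=VCF') for line in lines[:5]):
--         return False, "Missing VCF format declaration"
--
--     if not any(line.startswith('#CHROM') for line in lines):
--         return False, "Missing header line"
--
--     return True, "Valid VCF structure"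
-- ===== SOURCE B (Python) =====
-- def validate_vcf_structure(content: str):
--     """Validate basic VCF structure by scanning the raw text with substring
--     searches instead of materialising the list of lines."""
--     if not content:
--         return False, "Empty file"
--     s = content.strip()
--     if s.startswith('##fileformat=VCF'):
--         has_format = True
--     else:
--         j = s.find('\n##fileformat=VCF')
--         has_format = j != -1 and s[:j].count('\n') < 4
--     if not has_format:
--         return False, "Missing VCF format declaration"
--     if not (s.startswith('#CHROM') or '\n#CHROM' in s):
--         return False, "Missing header line"
--     return True, "Valid VCF structure"
-- ===== Notes on version B (the rewrite author's own statement) =====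
-- stated objective: alternative
-- what changed: B never builds the list of lines: it validates on the raw stripped text with substring searches - a startswith test at the start, a find of a newline followed by the format pattern together with a count of newlines before the first hit to enforce the first-5-lines rule, and a membership test for a newline followed by the header pattern - where A splits into lines and scans them with two any() passes.
import Mathlib
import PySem

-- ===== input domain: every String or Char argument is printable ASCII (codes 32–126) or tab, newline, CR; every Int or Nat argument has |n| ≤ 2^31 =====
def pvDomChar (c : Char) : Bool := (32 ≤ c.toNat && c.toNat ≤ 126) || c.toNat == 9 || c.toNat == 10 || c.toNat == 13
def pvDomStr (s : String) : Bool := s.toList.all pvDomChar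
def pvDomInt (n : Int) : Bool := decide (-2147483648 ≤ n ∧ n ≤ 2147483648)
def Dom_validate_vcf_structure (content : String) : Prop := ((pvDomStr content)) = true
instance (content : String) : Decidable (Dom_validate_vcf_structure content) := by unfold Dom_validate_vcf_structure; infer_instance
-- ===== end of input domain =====

-- B validates by substring search over the raw stripped text (find/count/in) instead of splitting into a line list and scanning it (alternative algorithm, same cost).


-- ===== PORT A =====
def validate_vcf_structure (content : String) : Bool × String :=
  if content = "" then (false, "Empty file")
  else
    let lines := ((PySem.Str.split? (PySem.Str.strip content) "\n").getD [])
    if ¬ (PySem.List.slice lines none (some 5)).any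
        (fun line => PySem.Str.startswith line "##fileformat=VCF") then
      (false, "Missing VCF format declaration")
    else if ¬ lines.any (fun line => PySem.Str.startswith line "#CHROM") then
      (false, "Missing header line")
    else
      (true, "Valid VCF structure")

-- ===== PORT B =====
def validate_vcf_structure_alt (content : String) : Bool × String :=
  if content = "" then (false, "Empty file")
  else
    let s := PySem.Str.strip content
    let has_format :=
      if PySem.Str.startswith s "##fileformat=VCF" then true
      else
        let j := PySem.Str.find s "\n##fileformat=VCF"
        if j = -1 then false
        else decide (PySem.Str.count (PySem.Str.slice s none (some j)) "\n" < 4)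
    if ¬ has_format then (false, "Missing VCF format declaration")
    else if ¬ (PySem.Str.startswith s "#CHROM" || PySem.Str.isIn "\n#CHROM" s) then
      (false, "Missing header line")
    else
      (true, "Valid VCF structure")

-- ===== PRECONDITION & SPEC =====
def Spec_validate_vcf_structure (content : String) (out : Bool × String) : Prop := out = validate_vcf_structure_alt content
instance (content : String) (out : Bool × String) : Decidable (Spec_validate_vcf_structure content out) := by unfold Spec_validate_vcf_structure; infer_instance

-- ===== CLAIM (what is proved, stated in full; the proofs are below) =====
def Claim_equal_validate_vcf_structure : Prop := ∀ (content : String), Dom_validate_vcf_structure content → Spec_validate_vcf_structure content (validate_vcf_structure content)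

-- ===== LEMMAS AND PROOFS =====

-- a clean structural spec of splitting on '\n'
def pvSp : List Char → List (List Char)
  | [] => [[]]
  | c :: cs => if c = '\n' then [] :: pvSp cs else (c :: (pvSp cs).headI) :: (pvSp cs).tail

theorem pvSp_ne_nil (s : List Char) : pvSp s ≠ [] := by
  cases s with
  | nil => simp [pvSp]
  | cons c cs => by_cases h : c = '\n' <;> simp [pvSp, h]

theorem pvSp_cons_headI_tail (s : List Char) : pvSp s = (pvSp s).headI :: (pvSp s).tail := by
  cases hs : pvSp s with
  | nil => exact absurd hs (pvSp_ne_nil s)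
  | cons a t => simp

theorem splitOn_go_eq (s : List Char) : ∀ (fuel : Nat) (cur : List Char) (acc : List (List Char)),
    s.length < fuel →
    PySem.Chars.splitOn.go ['\n'] fuel s cur acc
      = acc.reverse ++ (cur.reverse ++ (pvSp s).headI) :: (pvSp s).tail := by
  induction s with
  | nil =>
    intro fuel cur acc h
    cases fuel with
    | zero => omega
    | succ f => simp [PySem.Chars.splitOn.go, pvSp]
  | cons c cs ih =>
    intro fuel cur acc h
    cases fuel with
    | zero => omega
    | succ f =>
      by_cases hc : c = '\n'
      · have hp : List.isPrefixOf ['\n'] (c :: cs) = true := by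
          simp [List.isPrefixOf, hc]
        rw [PySem.Chars.splitOn.go]
        simp only [hp, if_pos rfl]
        rw [show List.drop (List.length ['\n']) (c :: cs) = cs by simp]
        rw [ih f [] (cur.reverse :: acc) (by simpa using Nat.lt_of_succ_lt_succ h)]
        simp [pvSp, hc]
        exact (pvSp_cons_headI_tail cs).symm
      · have hp : List.isPrefixOf ['\n'] (c :: cs) = false := by
          simp [List.isPrefixOf]
          exact fun hcon => absurd hcon.symm hc
        rw [PySem.Chars.splitOn.go]
        simp only [hp]
        rw [if_neg (by simp)]
        rw [ih f (c :: cur) acc (by simpa using Nat.lt_of_succ_lt_succ h)]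
        simp [pvSp, hc]
  
theorem splitOn_eq_pvSp (s : List Char) : PySem.Chars.splitOn s ['\n'] = pvSp s := by
  rw [PySem.Chars.splitOn, splitOn_go_eq s (s.length + 1) [] [] (by omega)]
  simp
  exact (pvSp_cons_headI_tail s).symm

theorem count_go_eq (s : List Char) : ∀ (fuel : Nat) (acc : Nat), s.length ≤ fuel →
    PySem.Chars.count.go ['\n'] fuel s acc = acc + s.count '\n' := by
  induction s with
  | nil =>
    intro fuel acc h
    cases fuel with
    | zero => simp [PySem.Chars.count.go]
    | succ f => simp [PySem.Chars.count.go]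
  | cons c cs ih =>
    intro fuel acc h
    cases fuel with
    | zero => simp at h
    | succ f =>
      by_cases hc : c = '\n'
      · have hp : List.isPrefixOf ['\n'] (c :: cs) = true := by simp [List.isPrefixOf, hc]
        rw [PySem.Chars.count.go]
        simp only [hp, if_pos rfl]
        rw [show List.drop (List.length ['\n']) (c :: cs) = cs by simp]
        rw [ih f (acc + 1) (by simpa using Nat.le_of_succ_le_succ h)]
        simp [hc, List.count_cons]
        omega
      · have hp : List.isPrefixOf ['\n'] (c :: cs) = false := by
          simp [List.isPrefixOf]
          exact fun hcon => absurd hcon.symm hc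
        rw [PySem.Chars.count.go]
        simp only [hp]
        rw [if_neg (by simp)]
        rw [ih f acc (by simpa using Nat.le_of_succ_le_succ h)]
        have : (c :: cs).count '\n' = cs.count '\n' := by
          simp [List.count_cons, hc]
        omega

theorem count_nl_eq (s : List Char) : PySem.Chars.count s ['\n'] = s.count '\n' := by
  rw [PySem.Chars.count]
  simp
  rw [count_go_eq s s.length 0 (le_refl _)]
  omega


theorem headI_prefix_iff (P s : List Char) (hP : '\n' ∉ P) :
    P <+: (pvSp s).headI ↔ P <+: s := by
  induction s generalizing P with
  | nil => simp [pvSp]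
  | cons c cs ih =>
    by_cases hc : c = '\n'
    · subst hc
      simp only [pvSp, if_pos rfl, List.headI_cons]
      constructor
      · intro h
        rw [List.prefix_nil.mp h]
        exact List.nil_prefix
      · intro h
        cases P with
        | nil => exact List.nil_prefix
        | cons p ps =>
          exfalso
          have := (List.cons_prefix_cons.mp h).1
          exact hP (this ▸ List.mem_cons_self)
    · simp only [pvSp, if_neg hc, List.headI_cons]
      cases P with
      | nil => simp
      | cons p ps =>
        rw [List.cons_prefix_cons, List.cons_prefix_cons]
        have hps : '\n' ∉ ps := fun h => hP (List.mem_cons_of_mem _ h)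
        rw [ih ps hps]

theorem tail_take_iff (P s : List Char) (hP : '\n' ∉ P) : ∀ (n : Nat),
    (∃ c ∈ ((pvSp s).tail.take n), P <+: c) ↔
      (∃ j : Nat, ('\n' :: P) <+: s.drop j ∧ (s.take j).count '\n' < n) := by
  induction s generalizing P with
  | nil =>
    intro n
    simp [pvSp, List.prefix_nil]
  | cons c cs ih =>
    intro n
    by_cases hc : c = '\n'
    · subst hc
      simp only [pvSp, if_true, List.tail_cons]
      cases n with
      | zero => simp
      | succ m =>
        rw [pvSp_cons_headI_tail cs, List.take_succ_cons]
        constructor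
        · rintro ⟨ch, hch, hpre⟩
          rcases List.mem_cons.mp hch with h1 | h2
          · refine ⟨0, ?_, by simp⟩
            simp only [List.drop_zero, List.cons_prefix_cons]
            exact ⟨trivial, (headI_prefix_iff P cs hP).mp (h1 ▸ hpre)⟩
          · rcases (ih P hP m).mp ⟨ch, h2, hpre⟩ with ⟨j, hj1, hj2⟩
            refine ⟨j + 1, by simpa using hj1, ?_⟩
            simp [List.count_cons]
            omega
        · rintro ⟨j, hj1, hj2⟩
          cases j with
          | zero =>
            refine ⟨(pvSp cs).headI, List.mem_cons_self, ?_⟩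
            rw [headI_prefix_iff P cs hP]
            simpa [List.cons_prefix_cons] using hj1
          | succ j' =>
            have hj1' : ('\n' :: P) <+: cs.drop j' := by simpa using hj1
            have hj2' : (cs.take j').count '\n' < m := by
              rw [List.take_succ_cons] at hj2
              simp [List.count_cons] at hj2
              omega
            rcases (ih P hP m).mpr ⟨j', hj1', hj2'⟩ with ⟨ch, hch, hpre⟩
            exact ⟨ch, List.mem_cons_of_mem _ hch, hpre⟩
    · simp only [pvSp, if_neg hc, List.tail_cons]
      rw [ih P hP n]
      constructor
      · rintro ⟨j, hj1, hj2⟩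
        refine ⟨j + 1, by simpa using hj1, ?_⟩
        simpa [List.count_cons, hc] using hj2
      · rintro ⟨j, hj1, hj2⟩
        cases j with
        | zero =>
          exfalso
          simp only [List.drop_zero, List.cons_prefix_cons] at hj1
          exact hc hj1.1.symm
        | succ j' =>
          refine ⟨j', by simpa using hj1, ?_⟩
          simpa [List.count_cons, hc] using hj2

theorem tail_mem_iff (P s : List Char) (hP : '\n' ∉ P) :
    (∃ c ∈ (pvSp s).tail, P <+: c) ↔ (∃ j : Nat, ('\n' :: P) <+: s.drop j) := by
  have h := tail_take_iff P s hP ((pvSp s).tail.length + s.length + 1)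
  rw [List.take_of_length_le (by omega)] at h
  rw [h]
  constructor
  · rintro ⟨j, hj, _⟩; exact ⟨j, hj⟩
  · rintro ⟨j, hj⟩
    by_cases hjs : j ≤ s.length
    · refine ⟨j, hj, ?_⟩
      have := List.count_le_length (l := s.take j) (a := '\n')
      have := List.length_take_le j s
      omega
    · refine ⟨s.length, ?_, ?_⟩
      · rw [List.drop_of_length_le (by omega)] at hj
        rw [List.drop_of_length_le (by omega)]
        exact hj
      · have := List.count_le_length (l := s.take s.length) (a := '\n')
        have := List.length_take_le s.length s
        omega

theorem count_take_mono (s : List Char) (a : Char) (i j : Nat) (h : i ≤ j) :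
    (s.take i).count a ≤ (s.take j).count a := by
  have h1 : s.take i = (s.take j).take i := by
    rw [List.take_take, Nat.min_eq_left h]
  rw [h1]
  exact ((s.take j).take_sublist i).count_le a

theorem infix_iff_exists_drop (t s : List Char) : t <:+: s ↔ ∃ j : Nat, t <+: s.drop j := by
  rw [← PySem.Chars.isIn_iff_infix]
  exact (PySem.Chars.exists_prefix_drop_iff_isIn t s).symm

-- B's format-search boolean agrees with the existential characterisation
theorem find_cond_iff (P s : List Char) (hP : '\n' ∉ P) :
    (if PySem.Chars.find s ('\n' :: P) = -1 then false
     else decide (PySem.Chars.count (s.take (PySem.Chars.find s ('\n' :: P)).toNat) ['\n'] < 4)) = true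
      ↔ (∃ j : Nat, ('\n' :: P) <+: s.drop j ∧ (s.take j).count '\n' < 4) := by
  by_cases hf : PySem.Chars.find s ('\n' :: P) = -1
  · simp only [hf, if_pos rfl]
    constructor
    · intro h; exact absurd h (by simp)
    · rintro ⟨j, hj, _⟩
      exfalso
      have hinf : ('\n' :: P) <:+: s := (infix_iff_exists_drop _ s).mpr ⟨j, hj⟩
      exact (PySem.Chars.find_ne_neg_one_iff s ('\n' :: P)).mpr hinf hf
  · have hpos : 0 ≤ PySem.Chars.find s ('\n' :: P) := by
      have := PySem.Chars.neg_one_le_find s ('\n' :: P)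
      omega
    obtain ⟨hpre, hmin⟩ := PySem.Chars.find_spec (s := s) (sub := '\n' :: P) hpos
    rw [if_neg hf]
    simp only [count_nl_eq, decide_eq_true_eq]
    constructor
    · intro h
      exact ⟨(PySem.Chars.find s ('\n' :: P)).toNat, hpre, h⟩
    · rintro ⟨j, hj1, hj2⟩
      have hle : (PySem.Chars.find s ('\n' :: P)).toNat ≤ j := by
        by_contra hlt
        exact hmin j (by omega) hj1
      calc (s.take (PySem.Chars.find s ('\n' :: P)).toNat).count '\n'
          ≤ (s.take j).count '\n' := count_take_mono s '\n' _ j hle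
        _ < 4 := hj2

-- the two CHROM checks agree
theorem chrom_eq (s : List Char) :
    (pvSp s).any (fun l => PySem.Chars.startswith l "#CHROM".toList)
      = (PySem.Chars.startswith s "#CHROM".toList || PySem.Chars.isIn ('\n' :: "#CHROM".toList) s) := by
  have hP : '\n' ∉ "#CHROM".toList := by decide
  rw [Bool.eq_iff_iff, List.any_eq_true]
  simp only [PySem.Chars.startswith_iff, Bool.or_eq_true, PySem.Chars.isIn_iff_infix,
    infix_iff_exists_drop]
  constructor
  · rintro ⟨ch, hch, hpre⟩
    rw [pvSp_cons_headI_tail s, List.mem_cons] at hch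
    rcases hch with h1 | h2
    · exact Or.inl ((headI_prefix_iff _ s hP).mp (h1 ▸ (by simpa using hpre)))
    · exact Or.inr ((tail_mem_iff _ s hP).mp ⟨ch, h2, by simpa using hpre⟩)
  · rintro (h | h)
    · refine ⟨(pvSp s).headI, ?_, by simpa using (headI_prefix_iff _ s hP).mpr h⟩
      rw [pvSp_cons_headI_tail s]; exact List.mem_cons_self
    · rcases (tail_mem_iff _ s hP).mpr h with ⟨ch, hch, hpre⟩
      refine ⟨ch, ?_, by simpa using hpre⟩
      rw [pvSp_cons_headI_tail s]; exact List.mem_cons_of_mem _ hch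

-- the two format checks agree
theorem format_eq (s : List Char) :
    ((pvSp s).take 5).any (fun l => PySem.Chars.startswith l "##fileformat=VCF".toList)
      = (PySem.Chars.startswith s "##fileformat=VCF".toList ||
          (if PySem.Chars.find s ('\n' :: "##fileformat=VCF".toList) = -1 then false
           else decide (PySem.Chars.count (s.take (PySem.Chars.find s ('\n' :: "##fileformat=VCF".toList)).toNat) ['\n'] < 4))) := by
  have hP : '\n' ∉ "##fileformat=VCF".toList := by decide
  rw [Bool.eq_iff_iff, List.any_eq_true]
  simp only [PySem.Chars.startswith_iff, Bool.or_eq_true, find_cond_iff _ s hP]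
  constructor
  · rintro ⟨ch, hch, hpre⟩
    rw [pvSp_cons_headI_tail s, List.take_succ_cons, List.mem_cons] at hch
    rcases hch with h1 | h2
    · exact Or.inl ((headI_prefix_iff _ s hP).mp (h1 ▸ (by simpa using hpre)))
    · exact Or.inr ((tail_take_iff _ s hP 4).mp ⟨ch, h2, by simpa using hpre⟩)
  · rintro (h | h)
    · refine ⟨(pvSp s).headI, ?_, by simpa using (headI_prefix_iff _ s hP).mpr h⟩
      rw [pvSp_cons_headI_tail s, List.take_succ_cons]; exact List.mem_cons_self
    · rcases (tail_take_iff _ s hP 4).mpr h with ⟨ch, hch, hpre⟩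
      refine ⟨ch, ?_, by simpa using hpre⟩
      rw [pvSp_cons_headI_tail s, List.take_succ_cons]; exact List.mem_cons_of_mem _ hch


theorem split_lines_eq (s : String) :
    ((PySem.Str.split? s "\n").getD []) = (pvSp s.toList).map String.ofList := by
  have h1 : ("\n" : String).toList = ['\n'] := by decide
  simp [PySem.Str.split?, PySem.Chars.split?, h1, splitOn_eq_pvSp]

theorem a1_eq (s : String) :
    (PySem.List.slice ((PySem.Str.split? s "\n").getD []) none (some 5)).any
        (fun line => PySem.Str.startswith line "##fileformat=VCF")
      = (if PySem.Str.startswith s "##fileformat=VCF" then true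
         else if PySem.Str.find s "\n##fileformat=VCF" = -1 then false
         else decide (PySem.Str.count
              (PySem.Str.slice s none (some (PySem.Str.find s "\n##fileformat=VCF"))) "\n" < 4)) := by
  rw [split_lines_eq]
  rw [show (5 : Int) = ((5 : Nat) : Int) from rfl, PySem.List.slice_to_natCast]
  rw [← List.map_take, List.any_map]
  have hany : ((pvSp s.toList).take 5).any
      ((fun line => PySem.Str.startswith line "##fileformat=VCF") ∘ String.ofList)
      = ((pvSp s.toList).take 5).any (fun l => PySem.Chars.startswith l "##fileformat=VCF".toList) := by
    congr 1
    funext l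
    simp [Function.comp_def]
  rw [hany, format_eq]
  by_cases hf : PySem.Chars.find s.toList ('\n' :: "##fileformat=VCF".toList) = -1
  · simp at hf
    simp [hf]
  · have hpos : 0 ≤ PySem.Chars.find s.toList ('\n' :: "##fileformat=VCF".toList) := by
      have := PySem.Chars.neg_one_le_find s.toList ('\n' :: "##fileformat=VCF".toList)
      omega
    have hsl : PySem.List.slice s.toList none
        (some (PySem.Chars.find s.toList ('\n' :: "##fileformat=VCF".toList)))
        = s.toList.take (PySem.Chars.find s.toList ('\n' :: "##fileformat=VCF".toList)).toNat := by
      rw [show PySem.Chars.find s.toList ('\n' :: "##fileformat=VCF".toList)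
            = (((PySem.Chars.find s.toList ('\n' :: "##fileformat=VCF".toList)).toNat : Nat) : Int) by omega]
      rw [PySem.List.slice_to_natCast]
      simp
      omega
    simp at hf hsl
    simp [hf, hsl]
    rfl

theorem a2_eq (s : String) :
    ((PySem.Str.split? s "\n").getD []).any (fun line => PySem.Str.startswith line "#CHROM")
      = (PySem.Str.startswith s "#CHROM" || PySem.Str.isIn "\n#CHROM" s) := by
  rw [split_lines_eq]
  have hchrom := chrom_eq s.toList
  simp at hchrom
  simp [List.any_map, Function.comp_def, hchrom]

-- ===== VERDICT (by name: the statement is the Claim_ definition above) =====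
theorem validate_vcf_structure_spec : Claim_equal_validate_vcf_structure := by
  intro content _
  unfold Spec_validate_vcf_structure
  by_cases h : content = ""
  · simp [validate_vcf_structure, validate_vcf_structure_alt, h]
  · simp only [validate_vcf_structure, validate_vcf_structure_alt, h, if_false]
    rw [a1_eq, a2_eq]
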